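-- pv_equiv track=rewrite | github.com/sieuno3o/codingtest | 프로그래머스/1/42840. 모의고사/모의고사.py | solution
-- ===== SOURCE A (Python) =====
-- def solution(answers):
--
--     P1 = [1, 2, 3, 4, 5]
--     P2 = [2, 1, 2, 3, 2, 4, 2, 5]
--     P3 = [3, 3, 1, 1, 2, 2, 4, 4, 5, 5]
--
--     score = [0, 0, 0]
--
--     for i in range(len(answers)):
--         Q1 = i % 5
--         Q2 = i % 8
--         Q3 = i % 10
--
--         if answers[i] == P1[Q1]:
--             score[0] += 1
--         if answers[i] == P2[Q2]:
--             score[1] += 1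
--         if answers[i] == P3[Q3]:
--             score[2] += 1
--
--     answer = []
--     for i in range(len(score)):
--         if score[i] == max(score):
--             answer.append(i+1)
--
--     return answer
-- ===== SOURCE B (Python) =====
-- def solution(answers):
--     pats = [[1, 2, 3, 4, 5],
--             [2, 1, 2, 3, 2, 4, 2, 5],
--             [3, 3, 1, 1, 2, 2, 4, 4, 5, 5]]
--     # histogram of (position mod 40, answer); 40 = lcm of the three pattern periods
--     cnt = {}
--     for i, a in enumerate(answers):
--         k = (i % 40, a)
--         cnt[k] = cnt.get(k, 0) + 1
--     # each pattern's score is 40 table lookups, no per-element comparison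
--     scores = [sum(cnt.get((r, p[r % len(p)]), 0) for r in range(40)) for p in pats]
--     best = max(scores)
--     return [p + 1 for p in range(3) if scores[p] == best]
-- ===== Notes on version B (the rewrite author's own statement) =====
-- stated objective: alternative
-- what changed: Replaces A's per-element triple comparison loop by a period-40 histogram: one pass builds a dict keyed by (index mod 40, answer), then each pattern's score is a sum of 40 dictionary lookups, so no answer is ever compared against a pattern value.
import Mathlib
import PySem

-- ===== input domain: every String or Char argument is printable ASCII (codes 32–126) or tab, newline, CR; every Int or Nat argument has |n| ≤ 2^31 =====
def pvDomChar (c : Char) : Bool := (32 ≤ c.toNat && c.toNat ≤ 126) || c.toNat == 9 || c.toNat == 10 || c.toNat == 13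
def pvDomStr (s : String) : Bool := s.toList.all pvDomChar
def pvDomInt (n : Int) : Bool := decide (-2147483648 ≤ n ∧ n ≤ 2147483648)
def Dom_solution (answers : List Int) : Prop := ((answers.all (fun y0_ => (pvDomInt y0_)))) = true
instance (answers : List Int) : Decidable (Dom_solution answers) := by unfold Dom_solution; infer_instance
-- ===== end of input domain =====

-- B replaces A's per-element triple-comparison loop by a period-40 histogram keyed by
-- (index mod 40, answer); each score becomes 40 dictionary lookups. Same O(n) cost.

-- ===== PORT A =====
-- A: one loop over indices, updating all three scores via modulo indexing.
def solution (answers : List Int) : List Int :=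
  let P1 : List Int := [1, 2, 3, 4, 5]
  let P2 : List Int := [2, 1, 2, 3, 2, 4, 2, 5]
  let P3 : List Int := [3, 3, 1, 1, 2, 2, 4, 4, 5, 5]
  let score := (List.range answers.length).foldl (fun (s : Int × Int × Int) i =>
    -- answers[i], P1[i % 5] … are always in range here, so getD is exact
    let a := answers.getD i 0
    let s0 := if a = P1.getD (i % 5) 0 then s.1 + 1 else s.1
    let s1 := if a = P2.getD (i % 8) 0 then s.2.1 + 1 else s.2.1
    let s2 := if a = P3.getD (i % 10) 0 then s.2.2 + 1 else s.2.2
    (s0, s1, s2)) (0, 0, 0)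
  let scoreL := [score.1, score.2.1, score.2.2]
  (List.range 3).foldl (fun acc i =>
    if scoreL.getD i 0 = (PySem.List.max? scoreL (fun y => y)).getD 0
    then acc ++ [(i : Int) + 1] else acc) []

-- ===== PORT B =====
def pvPats : List (List Int) :=
  [[1, 2, 3, 4, 5], [2, 1, 2, 3, 2, 4, 2, 5], [3, 3, 1, 1, 2, 2, 4, 4, 5, 5]]

-- B: the histogram loop 'for i, a in enumerate(answers): cnt[(i%40, a)] = cnt.get(..,0)+1'
def pvCnt (answers : List Int) : PySem.Dict (Int × Int) Int :=
  (PySem.List.enumerate answers).foldl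
    (fun d ia =>
      let k := (PySem.Int.mod ia.1 40, ia.2)
      d.insert k (d.getD k 0 + 1)) PySem.Dict.empty

-- B: sum(cnt.get((r, p[r % len(p)]), 0) for r in range(40))
def pvScoreB (cnt : PySem.Dict (Int × Int) Int) (pat : List Int) : Int :=
  ((PySem.List.pyRange 0 40 1).map
    (fun r => cnt.getD (r, PySem.List.pyGetD pat (PySem.Int.mod r (pat.length : Int)) 0) 0)).sum

def solution_alt (answers : List Int) : List Int :=
  let cnt := pvCnt answers
  let scores := pvPats.map (fun pat => pvScoreB cnt pat)
  let best := (PySem.List.max? scores (fun y => y)).getD 0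
  (PySem.List.pyRange 0 3 1).filterMap
    (fun p => if PySem.List.pyGetD scores p 0 = best then some (p + 1) else none)

-- ===== PRECONDITION & SPEC =====
def Spec_solution (answers : List Int) (out : List Int) : Prop := out = solution_alt answers
instance (answers : List Int) (out : List Int) : Decidable (Spec_solution answers out) := by unfold Spec_solution; infer_instance

-- ===== CLAIM (what is proved, stated in full; the proofs are below) =====
def Claim_equal_solution : Prop := ∀ (answers : List Int), Dom_solution answers → Spec_solution answers (solution answers)

-- ===== LEMMAS AND PROOFS =====

-- indicator sum over the first n indices, comparing answers[i] with pat[i % m]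
def pvRsum (answers pat : List Int) (m n : Nat) : Int :=
  ((List.range n).map
    (fun i => if answers.getD i 0 = pat.getD (i % m) 0 then (1 : Int) else 0)).sum

lemma pvRsum_succ (answers pat : List Int) (m n : Nat) :
    pvRsum answers pat m (n + 1) =
      pvRsum answers pat m n +
        (if answers.getD n 0 = pat.getD (n % m) 0 then (1 : Int) else 0) := by
  simp [pvRsum, List.range_succ]

-- A's single fold computes the three indicator sums componentwise
lemma foldA_eq (answers : List Int) (n : Nat) :
    (List.range n).foldl (fun (s : Int × Int × Int) i =>
      let a := answers.getD i 0
      let s0 := if a = ([1, 2, 3, 4, 5] : List Int).getD (i % 5) 0 then s.1 + 1 else s.1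
      let s1 := if a = ([2, 1, 2, 3, 2, 4, 2, 5] : List Int).getD (i % 8) 0 then s.2.1 + 1 else s.2.1
      let s2 := if a = ([3, 3, 1, 1, 2, 2, 4, 4, 5, 5] : List Int).getD (i % 10) 0 then s.2.2 + 1 else s.2.2
      (s0, s1, s2)) (0, 0, 0) =
    (pvRsum answers [1, 2, 3, 4, 5] 5 n,
     pvRsum answers [2, 1, 2, 3, 2, 4, 2, 5] 8 n,
     pvRsum answers [3, 3, 1, 1, 2, 2, 4, 4, 5, 5] 10 n) := by
  induction n with
  | zero => simp [pvRsum]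
  | succ k ih =>
      rw [List.range_succ, List.foldl_append, ih]
      simp only [List.foldl_cons, List.foldl_nil, pvRsum_succ]
      split_ifs <;> simp

-- the key list B's histogram counts
def pvKeys (answers : List Int) : List (Int × Int) :=
  (PySem.List.enumerate answers).map (fun ia => (PySem.Int.mod ia.1 40, ia.2))

lemma pvCnt_eq_counter (answers : List Int) :
    pvCnt answers = PySem.Dict.counter (pvKeys answers) := by
  rw [pvCnt, ← PySem.Dict.foldl_insert_getD_add_one_eq_counter, pvKeys, List.foldl_map]

-- indicator sum over a nodup index list collapses to one indicator
lemma sum_ind (rs : List Int) (kv : Int × Int) (f : Int → Int)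
    (hnd : rs.Nodup) (h : kv.1 ∈ rs) :
    (rs.map (fun r => if kv = (r, f r) then (1 : Int) else 0)).sum
      = if kv.2 = f kv.1 then 1 else 0 := by
  obtain ⟨k1, k2⟩ := kv
  induction rs with
  | nil => cases h
  | cons r rs ih =>
      rcases List.nodup_cons.mp hnd with ⟨hr, hnd'⟩
      by_cases hk : k1 = r
      · have hz : (rs.map (fun r' => if (k1, k2) = (r', f r') then (1 : Int) else 0)).sum = 0 := by
          apply List.sum_eq_zero
          intro x hx
          rcases List.mem_map.mp hx with ⟨r', hr', hxeq⟩
          have hne : ¬ (k1, k2) = (r', f r') := by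
            simp only [Prod.mk.injEq, not_and]
            intro he _
            apply hr
            rwa [← he, hk] at hr'
          simp [← hxeq, hne]
        have hkv : ((k1, k2) = (r, f r)) ↔ (k2 = f k1) := by
          simp [Prod.mk.injEq, hk]
        simp only [List.map_cons, List.sum_cons, hz, add_zero]
        rw [if_congr hkv rfl rfl]
      · have hmem : k1 ∈ rs := by
          rcases List.mem_cons.mp h with h' | h'
          · exact absurd h' hk
          · exact h'
        have hne : ¬ (k1, k2) = (r, f r) := by
          simp only [Prod.mk.injEq, not_and]
          intro he
          exact absurd he hk
        simp only [List.map_cons, List.sum_cons, hne, if_false, zero_add]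
        exact ih hnd' hmem

-- summing histogram counts along r ↦ (r, f r) over a nodup list covering all keys = countP
lemma sum_count_eq_countP (ks : List (Int × Int)) (rs : List Int) (f : Int → Int)
    (hnd : rs.Nodup) (h : ∀ kv ∈ ks, kv.1 ∈ rs) :
    (rs.map (fun r => (ks.count (r, f r) : Int))).sum
      = (ks.countP (fun kv => kv.2 = f kv.1) : Int) := by
  induction ks with
  | nil => simp
  | cons kv ks ih =>
      have hks : ∀ x ∈ ks, x.1 ∈ rs := fun x hx => h x (List.mem_cons_of_mem _ hx)
      have hkv : kv.1 ∈ rs := h kv List.mem_cons_self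
      have hcnt : ∀ r : Int, ((kv :: ks).count (r, f r) : Int)
          = (ks.count (r, f r) : Int) + (if kv = (r, f r) then (1 : Int) else 0) := by
        intro r
        rw [List.count_cons]
        by_cases he : kv = (r, f r) <;> simp [he]
      calc (rs.map (fun r => ((kv :: ks).count (r, f r) : Int))).sum
          = (rs.map (fun r => (ks.count (r, f r) : Int)
              + (if kv = (r, f r) then (1 : Int) else 0))).sum := by
            congr 1; exact List.map_congr_left (fun r _ => hcnt r)
        _ = (rs.map (fun r => (ks.count (r, f r) : Int))).sum
              + (rs.map (fun r => if kv = (r, f r) then (1 : Int) else 0)).sum := by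
            rw [← List.sum_map_add]
        _ = (ks.countP (fun kv => kv.2 = f kv.1) : Int)
              + (if kv.2 = f kv.1 then 1 else 0) := by
            rw [ih hks, sum_ind rs kv f hnd hkv]
        _ = ((kv :: ks).countP (fun kv => kv.2 = f kv.1) : Int) := by
            rw [List.countP_cons]
            by_cases he : kv.2 = f kv.1
            · simp [he]
            · simp [he]

-- countP over enumerate as an indicator sum over indices
lemma countP_enumerate (answers : List Int) (q : Int → Int → Bool) (s : Int) :
    (((PySem.List.enumerate answers s).countP (fun ia => q ia.1 ia.2)) : Int)
      = ((List.range answers.length).map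
          (fun (k : Nat) => if q (s + (k : Int)) (answers.getD k 0) then (1 : Int) else 0)).sum := by
  induction answers generalizing s with
  | nil => simp [PySem.List.enumerate_nil]
  | cons x xs ih =>
      rw [PySem.List.enumerate_cons, List.countP_cons]
      push_cast
      rw [ih (s + 1)]
      simp only [List.length_cons, List.range_succ_eq_map, List.map_cons, List.sum_cons,
        List.map_map, Nat.cast_zero, add_zero, List.getD_cons_zero]
      have hmaps : ((List.range xs.length).map
            (fun (k : Nat) => if q (s + 1 + (k : Int)) (xs.getD k 0) then (1 : Int) else 0))
          = ((List.range xs.length).map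
              ((fun (k : Nat) => if q (s + (k : Int)) ((x :: xs).getD k 0) then (1 : Int) else 0)
                ∘ Nat.succ)) := by
        apply List.map_congr_left
        intro k _
        simp only [Function.comp]
        have : s + 1 + (k : Int) = s + ((Nat.succ k : Nat) : Int) := by push_cast; ring
        rw [this]
        rfl
      rw [hmaps]
      by_cases hq : q s x
      · simp [hq]
        ring
      · simp [hq]

-- B's histogram score equals the indicator sum, for each pattern (period dividing 40)
lemma pvScoreB_eq (answers pat : List Int) (L : Nat) (hlen : pat.length = L)
    (hdvd : L ∣ 40) :
    pvScoreB (pvCnt answers) pat = pvRsum answers pat L answers.length := by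
  set f : Int → Int := fun r => PySem.List.pyGetD pat (PySem.Int.mod r (pat.length : Int)) 0 with hf
  have h1 : pvScoreB (pvCnt answers) pat
      = ((PySem.List.pyRange 0 40 1).map
          (fun r => ((pvKeys answers).count (r, f r) : Int))).sum := by
    rw [pvScoreB]
    congr 1
    apply List.map_congr_left
    intro r _
    rw [pvCnt_eq_counter, PySem.Dict.getD_counter]
  rw [h1, sum_count_eq_countP _ _ _ (PySem.List.nodup_pyRange_one 0 40) ?hmem]
  case hmem =>
    intro kv hkv
    rcases List.mem_map.mp hkv with ⟨ia, _, hia⟩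
    rw [← hia]
    rw [PySem.List.mem_pyRange_one]
    exact ⟨PySem.Int.mod_nonneg _ (by norm_num), PySem.Int.mod_lt _ (by norm_num)⟩
  rw [pvKeys, List.countP_map]
  have h2 := countP_enumerate answers (fun i a => decide (a = f (PySem.Int.mod i 40))) 0
  simp only [] at h2
  rw [show ((fun kv : Int × Int => decide (kv.2 = f kv.1)) ∘
        (fun ia : Int × Int => (PySem.Int.mod ia.1 40, ia.2)))
      = (fun ia : Int × Int => decide (ia.2 = f (PySem.Int.mod ia.1 40))) from rfl]
  rw [h2, pvRsum]
  congr 1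
  apply List.map_congr_left
  intro k hk
  have hfk : f (PySem.Int.mod (0 + (k : Int)) 40) = pat.getD (k % L) 0 := by
    have e1 : (0 : Int) + (k : Int) = ((k : Nat) : Int) := zero_add _
    simp only [hf]
    rw [e1, show (40 : Int) = ((40 : Nat) : Int) from rfl, PySem.Int.mod_natCast, hlen,
      PySem.Int.mod_natCast, PySem.List.pyGetD_natCast, Nat.mod_mod_of_dvd k hdvd]
  rw [hfk]
  simp

-- evaluate pyGetD on a 3-element literal list at 0,1,2
lemma pyGetD3 (a b c d : Int) :
    PySem.List.pyGetD [a, b, c] 0 d = a ∧ PySem.List.pyGetD [a, b, c] 1 d = b ∧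
      PySem.List.pyGetD [a, b, c] 2 d = c := by
  refine ⟨?_, ?_, ?_⟩ <;> simp [PySem.List.pyGetD, PySem.List.pyGet?, PySem.List.pyIdx?]

-- ===== VERDICT (by name: the statement is the Claim_ definition above) =====
theorem solution_spec : Claim_equal_solution := by
  intro answers _
  unfold Spec_solution
  simp only [solution, solution_alt]
  rw [foldA_eq]
  simp only [pvPats, List.map_cons, List.map_nil,
    pvScoreB_eq answers [1, 2, 3, 4, 5] 5 rfl (by norm_num),
    pvScoreB_eq answers [2, 1, 2, 3, 2, 4, 2, 5] 8 rfl (by norm_num),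
    pvScoreB_eq answers [3, 3, 1, 1, 2, 2, 4, 4, 5, 5] 10 rfl (by norm_num)]
  set a := pvRsum answers [1, 2, 3, 4, 5] 5 answers.length
  set b := pvRsum answers [2, 1, 2, 3, 2, 4, 2, 5] 8 answers.length
  set c := pvRsum answers [3, 3, 1, 1, 2, 2, 4, 4, 5, 5] 10 answers.length
  have hr : PySem.List.pyRange 0 3 1 = [0, 1, 2] := by decide
  obtain ⟨h0, h1, h2⟩ := pyGetD3 a b c 0
  show (List.range 3).foldl _ [] = _
  simp only [hr, List.range_succ, List.range_zero, List.foldl_nil, List.foldl_cons,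
    List.foldl_append, List.filterMap_cons, List.filterMap_nil, h0, h1, h2,
    List.getD_cons_zero, List.getD_cons_succ]
  split_ifs <;> rfl
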